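-- pv_equiv track=rewrite | github.com/jigsaw-snu/Rosalind | ba2/ba2a.py | neighbors_Dd
-- ===== SOURCE A (Python) =====
-- def hamming_distance(seq1: str, seq2: str) -> int:
--     if len(seq1) != len(seq2):
--         raise Exception("Length of input sequences are different!")
--
--     score = 0
--
--     for i in range(len(seq1)):
--         if seq1[i] != seq2[i]:
--             score += 1
--
--     return score
--
-- def neighbors_Dd(seq: str, d: int) -> list:
--     neighbors = []
--
--     if d == 0:
--         return [seq]
--
--     if len(seq) < 2:  # base case
--         return ['A', 'C', 'G', 'T']
--
--     init_base = seq[0]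
--     suffix = seq[1:]
--
--     suffix_neighbors = neighbors_Dd(suffix, d)  # recursive case
--
--     for suff_nb in suffix_neighbors:
--         if hamming_distance(suffix, suff_nb) < d:
--             neighbors += [x + suff_nb for x in ['A', 'C', 'G', 'T']]
--         else:
--             neighbors += [init_base + suff_nb]
--
--     return neighbors
-- ===== SOURCE B (Python) =====
-- def neighbors_Dd(seq: str, d: int) -> list:
--     # Recurse returning (neighbor, distance) pairs so the Hamming distance is
--     # carried along instead of recomputed for every suffix neighbor.
--     def go(s):
--         if d == 0:
--             return [(s, 0)]
--         if len(s) < 2: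
--             return [(x, 0 if x == s else 1) for x in 'ACGT']
--         first, rest = s[0], s[1:]
--         out = []
--         for nb, dist in go(rest):
--             if dist < d:
--                 out.extend((x + nb, dist + (x != first)) for x in 'ACGT')
--             else:
--                 out.append((first + nb, dist))
--         return out
--     return [nb for nb, _ in go(seq)]
-- ===== Notes on version B (the rewrite author's own statement) =====
-- stated objective: faster
-- what changed: B's recursion returns (neighbor, distance) pairs and updates the distance incrementally when prepending a base, instead of recomputing the Hamming distance of every suffix neighbor from scratch at each level; intended as faster (a timing run measured 3.5-4.4x at the sizes it completed; larger sizes were voided in this sandbox).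
import Mathlib
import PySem

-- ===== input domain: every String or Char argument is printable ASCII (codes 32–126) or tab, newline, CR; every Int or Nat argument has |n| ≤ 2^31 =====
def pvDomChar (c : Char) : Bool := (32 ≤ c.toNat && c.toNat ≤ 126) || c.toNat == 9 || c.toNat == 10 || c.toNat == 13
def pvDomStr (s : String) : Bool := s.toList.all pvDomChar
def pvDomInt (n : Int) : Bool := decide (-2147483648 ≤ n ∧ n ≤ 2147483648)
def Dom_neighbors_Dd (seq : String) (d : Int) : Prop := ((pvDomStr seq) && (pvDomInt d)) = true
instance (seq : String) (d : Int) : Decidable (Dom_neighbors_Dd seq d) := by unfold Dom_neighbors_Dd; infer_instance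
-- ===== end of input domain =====

-- B replaces A's per-neighbor Hamming-distance recomputation by a recursion that
-- returns (neighbor, distance) pairs, carrying the distance along (intended as faster;
-- a timing run measured 3.5-4.4x at the sizes it completed, larger sizes voided).


-- ===== PORT A =====
-- hamming_distance: none = the Python raise on unequal lengths (never reached from neighbors_Dd)
def hammingDistance (seq1 seq2 : List Char) : Option Int :=
  if seq1.length ≠ seq2.length then none
  else some ((List.range seq1.length).foldl
    (fun score i => if seq1[i]? ≠ seq2[i]? then score + 1 else score) 0)

def nbAuxA : List Char → Int → List (List Char)
  | seq, d =>
    if d = 0 then [seq]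
    else match seq with
    | [] => [['A'], ['C'], ['G'], ['T']]          -- len(seq) < 2 base case
    | [_] => [['A'], ['C'], ['G'], ['T']]
    | initBase :: suffix =>
      (nbAuxA suffix d).foldl (fun neighbors suffNb =>
        -- lengths are always equal here, so hammingDistance never returns none (.getD 0 is unreachable)
        neighbors ++ (if (hammingDistance suffix suffNb).getD 0 < d
                      then ['A', 'C', 'G', 'T'].map (fun x => x :: suffNb)
                      else [initBase :: suffNb])) []

def neighbors_Dd (seq : String) (d : Int) : List String :=
  (nbAuxA seq.toList d).map (fun l => String.mk l)

-- ===== PORT B =====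
def nbAuxB : Int → List Char → List (List Char × Int)
  | d, s =>
    if d = 0 then [(s, 0)]
    else match s with
    | [] => ['A', 'C', 'G', 'T'].map (fun x => (([x] : List Char), if ([x] : List Char) = [] then (0 : Int) else 1))
    | [c] => ['A', 'C', 'G', 'T'].map (fun x => (([x] : List Char), if ([x] : List Char) = [c] then (0 : Int) else 1))
    | first :: rest =>
      (nbAuxB d rest).foldl (fun out p =>
        if p.2 < d
        then out ++ ['A', 'C', 'G', 'T'].map (fun x => (x :: p.1, p.2 + if x ≠ first then (1 : Int) else 0))
        else out ++ [(first :: p.1, p.2)]) []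

def neighbors_Dd_alt (seq : String) (d : Int) : List String :=
  (nbAuxB d seq.toList).map (fun p => String.mk p.1)

-- ===== PRECONDITION & SPEC =====
def Spec_neighbors_Dd (seq : String) (d : Int) (out : List String) : Prop := out = neighbors_Dd_alt seq d
instance (seq : String) (d : Int) (out : List String) : Decidable (Spec_neighbors_Dd seq d out) := by unfold Spec_neighbors_Dd; infer_instance

-- ===== CLAIM (what is proved, stated in full; the proofs are below) =====
def Claim_equal_neighbors_Dd : Prop := ∀ (seq : String) (d : Int), Dom_neighbors_Dd seq d → Spec_neighbors_Dd seq d (neighbors_Dd seq d)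

-- ===== LEMMAS AND PROOFS =====

-- structural mismatch count (for equal-length lists it is what hammingDistance computes)
def mis : List Char → List Char → Int
  | a :: as, b :: bs => (if a ≠ b then 1 else 0) + mis as bs
  | _, _ => 0

lemma foldl_count_shift (a b : List Char) : ∀ (l : List Nat) (c : Int),
    l.foldl (fun s i => if a[i]? ≠ b[i]? then s + 1 else s) c
      = c + l.foldl (fun s i => if a[i]? ≠ b[i]? then s + 1 else s) 0 := by
  intro l
  induction l with
  | nil => intro c; simp
  | cons hd tl ih =>
    intro c
    simp only [List.foldl_cons]
    rw [ih, ih (if a[hd]? ≠ b[hd]? then (0:Int) + 1 else 0)]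
    split <;> ring

lemma ham_eq : ∀ (a b : List Char), a.length = b.length →
    hammingDistance a b = some (mis a b) := by
  intro a
  induction a with
  | nil =>
    intro b h
    cases b with
    | nil => simp [hammingDistance, mis]
    | cons y bs => simp at h
  | cons x as ih =>
    intro b h
    cases b with
    | nil => simp at h
    | cons y bs =>
      have hlen : as.length = bs.length := by simpa using h
      have hb := ih bs hlen
      rw [hammingDistance, if_neg (by omega : ¬ as.length ≠ bs.length)] at hb
      rw [hammingDistance, if_neg (by simp; omega : ¬ (x :: as).length ≠ (y :: bs).length)]
      apply congrArg some
      simp only [List.length_cons]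
      rw [List.range_succ_eq_map, List.foldl_cons, List.foldl_map]
      rw [show (fun (s : Int) (i : Nat) => if (x :: as)[i.succ]? ≠ (y :: bs)[i.succ]? then s + 1 else s)
            = (fun (s : Int) (i : Nat) => if as[i]? ≠ bs[i]? then s + 1 else s) by
          funext s i; simp]
      rw [foldl_count_shift, Option.some_inj.mp hb]
      simp only [mis, List.getElem?_cons_zero, ne_eq, Option.some.injEq, zero_add]

-- the main invariant: A's list is the first projection of B's pair list, and for
-- nonempty input (and d ≠ 0) each pair carries exactly the mismatch count and length
lemma foldl_ite_append {α β : Type} (p : β → Prop) [DecidablePred p] (f g : β → List α) :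
    ∀ (l : List β) (acc : List α),
      l.foldl (fun acc x => if p x then acc ++ f x else acc ++ g x) acc
        = acc ++ l.flatMap (fun x => if p x then f x else g x) := by
  intro l acc
  rw [show (fun (acc : List α) (x : β) => if p x then acc ++ f x else acc ++ g x)
        = (fun (acc : List α) (x : β) => acc ++ if p x then f x else g x) by
      funext acc x; split <;> rfl]
  rw [PySem.List.foldl_append_eq_flatMap]

lemma main_inv (d : Int) : ∀ (s : List Char),
    nbAuxA s d = (nbAuxB d s).map Prod.fst ∧
    (d ≠ 0 → s ≠ [] → ∀ p ∈ nbAuxB d s, p.1.length = s.length ∧ p.2 = mis s p.1) := by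
  intro s
  induction s with
  | nil =>
    constructor
    · by_cases hd : d = 0 <;> simp [nbAuxA, nbAuxB, hd]
    · intro _ hne; exact absurd rfl hne
  | cons c rest ih =>
    cases rest with
    | nil =>
      constructor
      · by_cases hd : d = 0 <;> simp [nbAuxA, nbAuxB, hd]
      · intro hd _ p hp
        simp only [nbAuxB, if_neg hd, List.mem_map] at hp
        obtain ⟨x, _, rfl⟩ := hp
        refine ⟨by simp, ?_⟩
        by_cases hxc : x = c
        · simp [mis, hxc]
        · simp [mis, hxc, Ne.symm hxc]
    | cons r2 rr =>
      by_cases hd : d = 0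
      · constructor
        · simp [nbAuxA, nbAuxB, hd]
        · intro hd' _; exact absurd hd hd'
      · obtain ⟨ihA, ihP⟩ := ih
        have ihP' := ihP hd (by simp)
        -- rewrite both folds as flatMap
        have hA : nbAuxA (c :: r2 :: rr) d
            = ((nbAuxB d (r2 :: rr)).map Prod.fst).flatMap (fun nb =>
                if (hammingDistance (r2 :: rr) nb).getD 0 < d
                then ['A','C','G','T'].map (fun x => x :: nb)
                else [c :: nb]) := by
          rw [nbAuxA, if_neg hd, ihA, PySem.List.foldl_append_eq_flatMap] <;> simp
        have hB : nbAuxB d (c :: r2 :: rr)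
            = (nbAuxB d (r2 :: rr)).flatMap (fun p =>
                if p.2 < d
                then ['A','C','G','T'].map (fun x => (x :: p.1, p.2 + if x ≠ c then (1:Int) else 0))
                else [(c :: p.1, p.2)]) := by
          rw [nbAuxB, if_neg hd] <;> try simp
          rw [foldl_ite_append]
          simp
        have branch : ∀ p ∈ nbAuxB d (r2 :: rr),
            (if (hammingDistance (r2 :: rr) p.1).getD 0 < d
             then ['A','C','G','T'].map (fun x => x :: p.1)
             else [c :: p.1])
            = ((if p.2 < d
                then ['A','C','G','T'].map (fun x => (x :: p.1, p.2 + if x ≠ c then (1:Int) else 0))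
                else [(c :: p.1, p.2)]) : List (List Char × Int)).map Prod.fst := by
          intro p hp
          obtain ⟨hlen, hmis⟩ := ihP' p hp
          rw [ham_eq _ _ hlen.symm, ← hmis]
          simp only [Option.getD_some]
          split <;> simp
        constructor
        · rw [hA, hB, List.flatMap_map, List.map_flatMap]
          apply List.flatMap_congr  -- pointwise over members
          intro p hp
          simpa using branch p hp
        · intro _ _ q hq
          rw [hB] at hq
          simp only [List.mem_flatMap] at hq
          obtain ⟨p, hp, hq⟩ := hq
          obtain ⟨hlen, hmis⟩ := ihP' p hp
          split at hq
          · simp only [List.map_cons, List.map_nil, List.mem_cons, List.not_mem_nil, or_false] at hq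
            rcases hq with h | h | h | h <;> subst h <;>
              refine ⟨by simp [hlen], ?_⟩ <;>
              · show _ = mis (c :: r2 :: rr) (_ :: p.1)
                simp only [mis, ← hmis]
                rw [show ∀ (u v : Char), (if u ≠ v then (1:Int) else 0) = (if v ≠ u then 1 else 0) by
                  intro u v; by_cases h : u = v <;> simp [h, Ne.symm]]
                ring
          · simp only [List.mem_singleton] at hq
            subst hq
            refine ⟨by simp [hlen], ?_⟩
            show _ = mis (c :: r2 :: rr) (c :: p.1)
            simp [mis, ← hmis]

-- ===== VERDICT (by name: the statement is the Claim_ definition above) =====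
theorem neighbors_Dd_spec : Claim_equal_neighbors_Dd := by
  intro seq d _
  show neighbors_Dd seq d = neighbors_Dd_alt seq d
  unfold neighbors_Dd neighbors_Dd_alt
  rw [(main_inv d seq.toList).1, List.map_map]
  rfl
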